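-- pv_equiv track=rewrite | github.com/Corpus68/FPOO195 | Listas y tuplas/Programa2.py | reemplazar_repetidos
-- ===== SOURCE A (Python) =====
-- def contar (tupla):
--     conteo = {}
--     for elemento in tupla:
--         if elemento in conteo:
--             conteo[elemento] += 1
--         else:
--             conteo[elemento] = 1
--     return conteo
--
-- def reemplazar_repetidos(tupla):
--     conteo = contar(tupla)
--     nueva_tupla = []
--     for elemento in tupla:
--         if conteo[elemento] > 1:
--             nueva_tupla.append(0)
--             conteo[elemento] -= 1
--         else:
--             nueva_tupla.append(elemento)
--     return tuple(nueva_tupla)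
-- ===== SOURCE B (Python) =====
-- def reemplazar_repetidos(tupla):
--     seen = set()
--     out = []
--     for elemento in reversed(tupla):
--         if elemento in seen:
--             out.append(0)
--         else:
--             out.append(elemento)
--             seen.add(elemento)
--     return tuple(reversed(out))
-- ===== Notes on version B (the rewrite author's own statement) =====
-- stated objective: alternative
-- what changed: Replaces the counting-dict pre-pass plus count-decrementing second pass with a single reverse traversal that keeps a 'seen' set: an element already seen (i.e. occurring later in the original order) becomes 0; the accumulated list is reversed at the end.
import Mathlib
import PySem

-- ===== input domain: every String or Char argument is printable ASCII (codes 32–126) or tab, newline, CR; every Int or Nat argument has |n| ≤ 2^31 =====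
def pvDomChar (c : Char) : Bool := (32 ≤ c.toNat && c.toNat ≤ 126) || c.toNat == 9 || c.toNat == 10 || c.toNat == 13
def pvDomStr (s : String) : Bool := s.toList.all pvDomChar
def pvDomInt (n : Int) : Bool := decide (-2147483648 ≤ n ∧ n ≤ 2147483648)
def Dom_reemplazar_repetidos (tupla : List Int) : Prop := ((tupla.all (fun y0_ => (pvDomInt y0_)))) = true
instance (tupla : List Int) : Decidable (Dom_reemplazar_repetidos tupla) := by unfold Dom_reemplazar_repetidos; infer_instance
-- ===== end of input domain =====

-- B replaces A's counting dict + decrementing second pass by one reverse pass with a 'seen' set (alternative decomposition).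

-- ===== PORT A =====
-- helper contar: the counting loop ('elemento in conteo' ↦ Dict.contains)
def contar (tupla : List Int) : PySem.Dict Int Int :=
  tupla.foldl
    (fun conteo elemento =>
      if conteo.contains elemento then conteo.insert elemento (conteo.getD elemento 0 + 1)
      else conteo.insert elemento 1)
    PySem.Dict.empty
-- the second loop; 'conteo[elemento]' is ported as getD _ 0: every element of the
-- list is a key of conteo (built by contar), so the lookup never raises and getD is exact there
def reemplazarLoopA (conteo : PySem.Dict Int Int) : List Int → List Int
  | [] => []
  | elemento :: rest =>
      if conteo.getD elemento 0 > 1 then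
        0 :: reemplazarLoopA (conteo.insert elemento (conteo.getD elemento 0 - 1)) rest
      else
        elemento :: reemplazarLoopA conteo rest

def reemplazar_repetidos (tupla : List Int) : List Int :=
  reemplazarLoopA (contar tupla) tupla

-- ===== PORT B =====
-- the reverse-pass loop over reversed(tupla) with the 'seen' set
def reemplazarLoopB (seen : PySem.Set Int) : List Int → List Int
  | [] => []
  | elemento :: rest =>
      if PySem.Set.contains seen elemento then 0 :: reemplazarLoopB seen rest
      else elemento :: reemplazarLoopB (PySem.Set.add seen elemento) rest

def reemplazar_repetidos_alt (tupla : List Int) : List Int :=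
  (reemplazarLoopB PySem.Set.empty tupla.reverse).reverse

-- ===== PRECONDITION & SPEC =====
def Spec_reemplazar_repetidos (tupla : List Int) (out : List Int) : Prop := out = reemplazar_repetidos_alt tupla
instance (tupla : List Int) (out : List Int) : Decidable (Spec_reemplazar_repetidos tupla out) := by unfold Spec_reemplazar_repetidos; infer_instance

-- ===== CLAIM (what is proved, stated in full; the proofs are below) =====
def Claim_equal_reemplazar_repetidos : Prop := ∀ (tupla : List Int), Dom_reemplazar_repetidos tupla → Spec_reemplazar_repetidos tupla (reemplazar_repetidos tupla)

-- ===== LEMMAS AND PROOFS =====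

-- common characterisation: an element is kept iff it does not occur again later
def keepLast : List Int → List Int
  | [] => []
  | x :: xs => (if x ∈ xs then 0 else x) :: keepLast xs

-- contar's two branches are the same insert (getD is 0 on a missing key)
lemma contar_getD (tupla : List Int) (v : Int) :
    (contar tupla).getD v 0 = tupla.count v := by
  have hstep : (fun (conteo : PySem.Dict Int Int) (elemento : Int) =>
      if conteo.contains elemento then conteo.insert elemento (conteo.getD elemento 0 + 1)
      else conteo.insert elemento 1)
      = fun conteo elemento => conteo.insert elemento (conteo.getD elemento 0 + 1) := by
    funext conteo elemento
    by_cases h : conteo.contains elemento = true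
    · simp [h]
    · rw [PySem.Dict.getD_of_not_contains conteo 0 (by simpa using h)]
      simp [h]
  have := PySem.Dict.getD_foldl_insert_add_one tupla PySem.Dict.empty v
  simpa [contar, hstep, PySem.Dict.getD_empty] using this

-- A's second loop under the invariant: conteo holds the count of v among the remaining elements
lemma loopA_eq_keepLast : ∀ (xs : List Int) (d : PySem.Dict Int Int),
    (∀ v ∈ xs, d.getD v 0 = xs.count v) → reemplazarLoopA d xs = keepLast xs := by
  intro xs
  induction xs with
  | nil => intro d _; rfl
  | cons x t ih =>
    intro d hd
    have hx : d.getD x 0 = (t.count x : Int) + 1 := by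
      simpa [List.count_cons_self] using hd x (by simp)
    by_cases hmem : x ∈ t
    · have hpos : 0 < t.count x := List.count_pos_iff.mpr hmem
      have hgt : d.getD x 0 > 1 := by omega
      have htail : ∀ v ∈ t, (d.insert x (d.getD x 0 - 1)).getD v 0 = t.count v := by
        intro v hv
        rw [PySem.Dict.getD_insert]
        by_cases hvx : v = x
        · subst hvx; simp [hx]
        · have hxv : x ≠ v := fun h => hvx h.symm
          have := hd v (by simp [hv])
          simpa [hvx, List.count_cons, hxv] using this
      simp [reemplazarLoopA, hgt, hmem, keepLast, ih _ htail]
    · have hcz : t.count x = 0 := List.count_eq_zero.mpr hmem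
      have hng : ¬ d.getD x 0 > 1 := by omega
      have htail : ∀ v ∈ t, d.getD v 0 = t.count v := by
        intro v hv
        have hxv : x ≠ v := fun h => hmem (h ▸ hv)
        have := hd v (by simp [hv])
        simpa [List.count_cons, hxv] using this
      simp [reemplazarLoopA, hng, hmem, keepLast, ih _ htail]

-- the seen-set after B's loop, and its membership
def seenAfter (s : PySem.Set Int) : List Int → PySem.Set Int
  | [] => s
  | y :: ys => if PySem.Set.contains s y then seenAfter s ys else seenAfter (PySem.Set.add s y) ys

lemma mem_seenAfter (u : List Int) : ∀ (s : PySem.Set Int) (x : Int),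
    x ∈ seenAfter s u ↔ x ∈ s ∨ x ∈ u := by
  induction u with
  | nil => intro s x; simp [seenAfter]
  | cons y ys ih =>
    intro s x
    by_cases hy : y ∈ s
    · simp [seenAfter, PySem.Set.contains, hy, ih]
      constructor
      · exact fun h => h.imp_right Or.inr
      · rintro (h | h | h)
        · exact Or.inl h
        · exact Or.inl (h ▸ hy)
        · exact Or.inr h
    · simp [seenAfter, PySem.Set.contains, hy, ih]
      tauto

  
lemma loopB_append_singleton (u : List Int) : ∀ (s : PySem.Set Int) (x : Int),
    reemplazarLoopB s (u ++ [x])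
      = reemplazarLoopB s u ++ [if x ∈ seenAfter s u then 0 else x] := by
  induction u with
  | nil =>
    intro s x
    simp only [List.nil_append, reemplazarLoopB, seenAfter, PySem.Set.contains]
    split <;> simp_all
  | cons y ys ih =>
    intro s x
    by_cases hy : y ∈ s <;>
      simp [reemplazarLoopB, seenAfter, PySem.Set.contains, hy, ih]

-- B relative to an initial seen set equals the keep-last spec extended by s
def keepLastS (s : PySem.Set Int) : List Int → List Int
  | [] => []
  | x :: xs => (if x ∈ xs ∨ x ∈ s then 0 else x) :: keepLastS s xs

lemma loopB_reverse_eq (xs : List Int) : ∀ (s : PySem.Set Int),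
    (reemplazarLoopB s xs.reverse).reverse = keepLastS s xs := by
  induction xs with
  | nil => intro s; rfl
  | cons x t ih =>
    intro s
    rw [List.reverse_cons, loopB_append_singleton]
    simp only [List.reverse_append, List.reverse_singleton, List.singleton_append]
    rw [ih]
    simp only [keepLastS]
    congr 1
    by_cases h : x ∈ t ∨ x ∈ s
    · have hm : x ∈ seenAfter s t.reverse := (mem_seenAfter _ _ _).mpr (by simpa [or_comm] using h)
      simp [h, hm]
    · have hm : x ∉ seenAfter s t.reverse := fun hc => h (by simpa [or_comm] using (mem_seenAfter _ _ _).mp hc)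
      simp [h, hm]

lemma keepLastS_empty (xs : List Int) : keepLastS PySem.Set.empty xs = keepLast xs := by
  induction xs with
  | nil => rfl
  | cons x t ih =>
    have ih' : keepLastS [] t = keepLast t := by simpa [PySem.Set.empty] using ih
    simp [keepLastS, keepLast, PySem.Set.empty, ih']

-- ===== VERDICT (by name: the statement is the Claim_ definition above) =====
theorem reemplazar_repetidos_spec : Claim_equal_reemplazar_repetidos := by
  intro tupla _
  unfold Spec_reemplazar_repetidos reemplazar_repetidos reemplazar_repetidos_alt
  rw [loopA_eq_keepLast tupla (contar tupla) (fun v _ => contar_getD tupla v),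
      loopB_reverse_eq, keepLastS_empty]
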